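-- pv_equiv track=rewrite | github.com/oriBayo/hackerrank-solutions | hackerrank/Car_Spark.py | opt
-- ===== SOURCE A (Python) =====
-- def opt(intervals):
--     optimal = []
--     for i in range(len(intervals)):
--         place = 0
--         for j in range(i):
--             if intervals[i][0][0] >= intervals[j][0][1]:
--                 place = j + 1
--         optimal.append(place)
--     return optimal
-- ===== SOURCE B (Python) =====
-- def opt(intervals):
--     # Monotonic stack of (end, index) pairs with strictly increasing ends,
--     # queried by binary search: O(n log n) instead of A's quadratic rescans.
--     res = []
--     stack = []  # (end, index); ends strictly increase, indices increase
--     for i in range(len(intervals)):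
--         s = intervals[i][0][0]
--         lo, hi = 0, len(stack)
--         while lo < hi:
--             mid = (lo + hi) // 2
--             if stack[mid][0] <= s:
--                 lo = mid + 1
--             else:
--                 hi = mid
--         res.append(stack[lo - 1][1] + 1 if lo > 0 else 0)
--         e = intervals[i][0][1]
--         while stack and stack[-1][0] >= e:
--             stack.pop()
--         stack.append((e, i))
--     return res
-- ===== Notes on version B (the rewrite author's own statement) =====
-- stated objective: faster
-- what changed: B replaces A's quadratic per-element rescan by a monotonic stack of (end,index) pairs with strictly increasing ends, answering each query by binary search over the stack, O(n log n) total.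
-- outside the precondition, e.g. on opt([[[5]]]): A returns [0], B raises IndexError; on opt([[[1, 2]], [[3]]]): A returns [0, 1], B raises IndexError
import Mathlib
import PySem

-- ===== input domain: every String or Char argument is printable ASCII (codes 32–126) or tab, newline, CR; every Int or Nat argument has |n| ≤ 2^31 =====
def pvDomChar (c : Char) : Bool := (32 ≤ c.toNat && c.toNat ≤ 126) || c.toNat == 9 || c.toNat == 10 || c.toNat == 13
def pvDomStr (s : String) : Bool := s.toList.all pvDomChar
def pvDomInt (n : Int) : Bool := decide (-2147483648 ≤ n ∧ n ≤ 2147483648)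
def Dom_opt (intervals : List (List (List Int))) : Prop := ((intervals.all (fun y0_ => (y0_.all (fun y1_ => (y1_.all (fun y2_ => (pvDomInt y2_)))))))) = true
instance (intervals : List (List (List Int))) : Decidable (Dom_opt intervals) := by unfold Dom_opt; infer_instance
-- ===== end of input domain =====

-- B replaces A's quadratic per-element rescan by a monotonic stack of (end,index)
-- pairs (strictly increasing ends) queried by binary search (O(n log n), measured faster).

-- shared indexing helper: xs[i][0][k]  (exact under Pre_, which keeps every access in range)
def pvCell (xs : List (List (List Int))) (i k : Int) : Int :=
  PySem.List.pyGetD (PySem.List.pyGetD (PySem.List.pyGetD xs i []) 0 []) k 0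

-- ===== PORT A =====
def opt (intervals : List (List (List Int))) : List Int :=
  (PySem.List.pyRange 0 (intervals.length : Int) 1).foldl
    (fun optimal i =>
      optimal ++ [(PySem.List.pyRange 0 i 1).foldl
        (fun place j =>
          if pvCell intervals i 0 ≥ pvCell intervals j 1 then j + 1 else place) 0])
    []

-- ===== PORT B =====
-- Source B's inner 'while lo < hi: …' binary search over the stack's end fields
-- (the fuel argument only makes the loop structurally terminating; hi - lo shrinks
-- by at least one per iteration, so fuel = hi - lo is never exhausted)
def pvBisGo (st : List (Int × Int)) (s : Int) (lo hi fuel : Nat) : Nat :=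
  match fuel with
  | 0 => lo
  | fuel + 1 =>
    if lo < hi then
      if (PySem.List.pyGetD st (((lo + hi) / 2 : Nat) : Int) (0, 0)).1 ≤ s then
        pvBisGo st s ((lo + hi) / 2 + 1) hi fuel
      else pvBisGo st s lo ((lo + hi) / 2) fuel
    else lo

def pvBis (st : List (Int × Int)) (s : Int) (lo hi : Nat) : Nat :=
  pvBisGo st s lo hi (hi - lo)

-- Source B's 'while stack and stack[-1][0] >= e: stack.pop()' (fuel = stack size suffices)
def pvPopGo (e : Int) (fuel : Nat) (st : List (Int × Int)) : List (Int × Int) :=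
  match fuel with
  | 0 => st
  | fuel + 1 =>
    if h : st = [] then st
    else if e ≤ (st.getLast h).1 then pvPopGo e fuel st.dropLast
    else st

def pvPop (e : Int) (st : List (Int × Int)) : List (Int × Int) :=
  pvPopGo e st.length st

def opt_alt (intervals : List (List (List Int))) : List Int :=
  ((PySem.List.pyRange 0 (intervals.length : Int) 1).foldl
    (fun (st : List Int × List (Int × Int)) i =>
      let s := pvCell intervals i 0
      let lo := pvBis st.2 s 0 st.2.length
      let e := pvCell intervals i 1
      (st.1 ++ [if 0 < lo then (PySem.List.pyGetD st.2 ((lo : Int) - 1) (0, 0)).2 + 1 else 0],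
       pvPop e st.2 ++ [(e, i)]))
    ([], [])).1

-- ===== PRECONDITION & SPEC =====
-- Pre_ requires every interval to carry both a start and an end. A raises IndexError on
-- ragged middle elements; additionally B reads both fields of EVERY interval while A never
-- reads the first interval's start or the last interval's end, so on inputs ragged only
-- there A returns while B raises IndexError — those inputs are excluded too (see cites).
def Pre_opt (intervals : List (List (List Int))) : Prop :=
  ∀ e ∈ intervals, e ≠ [] ∧ 2 ≤ e.headI.length
instance (intervals : List (List (List Int))) : Decidable (Pre_opt intervals) := by
  unfold Pre_opt; infer_instance

def pvWitness_opt : List (List (List Int)) := [[[0, 1]], [[1, 2]]]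

def Spec_opt (intervals : List (List (List Int))) (out : List Int) : Prop := out = opt_alt intervals
instance (intervals : List (List (List Int))) (out : List Int) : Decidable (Spec_opt intervals out) := by unfold Spec_opt; infer_instance

-- ===== CLAIM (what is proved, stated in full; the proofs are below) =====
def Claim_equal_opt : Prop := ∀ (intervals : List (List (List Int))), Dom_opt intervals → Pre_opt intervals → Spec_opt intervals (opt intervals)

-- ===== LEMMAS AND PROOFS =====

-- proof-side views of the two folds
def pvAfold (ivs : List (List (List Int))) (n : Int) : List Int :=
  (PySem.List.pyRange 0 n 1).foldl
    (fun optimal i =>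
      optimal ++ [(PySem.List.pyRange 0 i 1).foldl
        (fun place j =>
          if pvCell ivs i 0 ≥ pvCell ivs j 1 then j + 1 else place) 0])
    []

def pvBfold (ivs : List (List (List Int))) (n : Int) : List Int × List (Int × Int) :=
  (PySem.List.pyRange 0 n 1).foldl
    (fun (st : List Int × List (Int × Int)) i =>
      let s := pvCell ivs i 0
      let lo := pvBis st.2 s 0 st.2.length
      let e := pvCell ivs i 1
      (st.1 ++ [if 0 < lo then (PySem.List.pyGetD st.2 ((lo : Int) - 1) (0, 0)).2 + 1 else 0],
       pvPop e st.2 ++ [(e, i)]))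
    ([], [])

theorem opt_eq_pvAfold (ivs : List (List (List Int))) : opt ivs = pvAfold ivs (ivs.length : Int) := rfl
theorem opt_alt_eq_pvBfold (ivs : List (List (List Int))) : opt_alt ivs = (pvBfold ivs (ivs.length : Int)).1 := rfl

def pvEndAt (st : List (Int × Int)) (p : Nat) : Int := (st.getD p (0, 0)).1

-- stack invariant after processing indices 0..n-1
def pvInv (ivs : List (List (List Int))) (n : Int) (st : List (Int × Int)) : Prop :=
  st.Pairwise (fun p q => p.2 < q.2 ∧ p.1 < q.1) ∧
  (∀ p ∈ st, 0 ≤ p.2 ∧ p.2 < n ∧ p.1 = pvCell ivs p.2 1) ∧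
  (∀ j : Int, 0 ≤ j → j < n → ∃ p ∈ st, j ≤ p.2 ∧ p.1 ≤ pvCell ivs j 1)

theorem pvPopGo_succ (e : Int) (fuel : Nat) (st : List (Int × Int)) :
    pvPopGo e (fuel + 1) st =
      if h : st = [] then st
      else if e ≤ (st.getLast h).1 then pvPopGo e fuel st.dropLast
      else st := rfl

theorem pvPopGo_prefix (e : Int) :
    ∀ (fuel : Nat) (st : List (Int × Int)), pvPopGo e fuel st <+: st := by
  intro fuel
  induction fuel with
  | zero => intro st; exact List.prefix_refl _
  | succ fuel ih =>
      intro st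
      rw [pvPopGo_succ]
      split
      · exact List.prefix_refl _
      · split
        · exact (ih st.dropLast).trans (List.dropLast_prefix st)
        · exact List.prefix_refl _

theorem pvPop_prefix (e : Int) (st : List (Int × Int)) : pvPop e st <+: st :=
  pvPopGo_prefix e st.length st

theorem pvPopGo_popped (e : Int) :
    ∀ (fuel : Nat) (st : List (Int × Int)), ∀ x ∈ st, x ∉ pvPopGo e fuel st → e ≤ x.1 := by
  intro fuel
  induction fuel with
  | zero => intro st x hx hnx; exact absurd hx hnx
  | succ fuel ih =>
      intro st x hx hnx
      rw [pvPopGo_succ] at hnx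
      by_cases h : st = []
      · rw [dif_pos h] at hnx; exact absurd hx hnx
      · rw [dif_neg h] at hnx
        by_cases hle : e ≤ (st.getLast h).1
        · rw [if_pos hle] at hnx
          rw [← List.dropLast_append_getLast h] at hx
          rcases List.mem_append.1 hx with hx' | hx'
          · exact ih st.dropLast x hx' hnx
          · rw [List.mem_singleton.1 hx']; exact hle
        · rw [if_neg hle] at hnx; exact absurd hx hnx

theorem pvPop_popped (e : Int) (st : List (Int × Int)) :
    ∀ x ∈ st, x ∉ pvPop e st → e ≤ x.1 :=
  pvPopGo_popped e st.length st

theorem pvPopGo_lt (e : Int) :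
    ∀ (fuel : Nat) (st : List (Int × Int)), st.length ≤ fuel →
      st.Pairwise (fun p q => p.1 < q.1) → ∀ x ∈ pvPopGo e fuel st, x.1 < e := by
  intro fuel
  induction fuel with
  | zero =>
      intro st hlen _ x hx
      have : st = [] := List.eq_nil_of_length_eq_zero (by omega)
      rw [this] at hx
      cases hx
  | succ fuel ih =>
      intro st hlen hpw x hx
      rw [pvPopGo_succ] at hx
      by_cases h : st = []
      · rw [dif_pos h, h] at hx; cases hx
      · rw [dif_neg h] at hx
        by_cases hle : e ≤ (st.getLast h).1
        · rw [if_pos hle] at hx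
          have hlen' : st.dropLast.length ≤ fuel := by
            have := List.length_pos_of_ne_nil h
            rw [List.length_dropLast]; omega
          exact ih st.dropLast hlen' (hpw.sublist (List.dropLast_sublist st)) x hx
        · rw [if_neg hle] at hx
          have hlast : (st.getLast h).1 < e := lt_of_not_ge hle
          rw [← List.dropLast_append_getLast h] at hx hpw
          rcases List.mem_append.1 hx with hx' | hx'
          · have := (List.pairwise_append.1 hpw).2.2 x hx' (st.getLast h)
              (List.mem_singleton_self _)
            exact this.trans hlast
          · rw [List.mem_singleton.1 hx']; exact hlast

theorem pvPop_lt (e : Int) (st : List (Int × Int)) :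
    st.Pairwise (fun p q => p.1 < q.1) → ∀ x ∈ pvPop e st, x.1 < e :=
  pvPopGo_lt e st.length st (le_refl _)

theorem pvBisGo_succ (st : List (Int × Int)) (s : Int) (lo hi fuel : Nat) :
    pvBisGo st s lo hi (fuel + 1) =
      if lo < hi then
        if (PySem.List.pyGetD st (((lo + hi) / 2 : Nat) : Int) (0, 0)).1 ≤ s then
          pvBisGo st s ((lo + hi) / 2 + 1) hi fuel
        else pvBisGo st s lo ((lo + hi) / 2) fuel
      else lo := rfl

theorem pvBisGo_spec (st : List (Int × Int)) (s : Int)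
    (mono : ∀ a b : Nat, a ≤ b → b < st.length → pvEndAt st a ≤ pvEndAt st b) :
    ∀ (k lo hi : Nat), hi - lo ≤ k → lo ≤ hi → hi ≤ st.length →
    (∀ p, p < lo → pvEndAt st p ≤ s) →
    (∀ p, hi ≤ p → p < st.length → s < pvEndAt st p) →
    pvBisGo st s lo hi k ≤ st.length ∧
    (∀ p, p < pvBisGo st s lo hi k → pvEndAt st p ≤ s) ∧
    (∀ p, pvBisGo st s lo hi k ≤ p → p < st.length → s < pvEndAt st p) := by
  intro k
  induction k with
  | zero =>
      intro lo hi hk hlh hhl hlo hhi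
      have heq : lo = hi := by omega
      rw [show pvBisGo st s lo hi 0 = lo from rfl]
      exact ⟨by omega, hlo, fun p hp hpl => hhi p (by omega) hpl⟩
  | succ k ih =>
      intro lo hi hk hlh hhl hlo hhi
      rw [pvBisGo_succ]
      by_cases hlt : lo < hi
      · have hmlt : (lo + hi) / 2 < hi := by omega
        have hmge : lo ≤ (lo + hi) / 2 := by omega
        have hmlen : (lo + hi) / 2 < st.length := by omega
        rw [if_pos hlt, PySem.List.pyGetD_natCast,
          show (st.getD ((lo + hi) / 2) (0, 0)).1 = pvEndAt st ((lo + hi) / 2) from rfl]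
        by_cases hc : pvEndAt st ((lo + hi) / 2) ≤ s
        · rw [if_pos hc]
          refine ih ((lo + hi) / 2 + 1) hi (by omega) (by omega) hhl ?_ hhi
          intro p hp
          exact le_trans (mono p ((lo + hi) / 2) (by omega) hmlen) hc
        · rw [if_neg hc]
          refine ih lo ((lo + hi) / 2) (by omega) (by omega) (by omega) hlo ?_
          intro p hp hplen
          exact lt_of_lt_of_le (lt_of_not_ge hc) (mono ((lo + hi) / 2) p hp hplen)
      · rw [if_neg hlt]
        exact ⟨by omega, hlo, fun p hp hpl => hhi p (by omega) hpl⟩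

theorem pvBis_spec (st : List (Int × Int)) (s : Int)
    (mono : ∀ a b : Nat, a ≤ b → b < st.length → pvEndAt st a ≤ pvEndAt st b)
    (lo hi : Nat) (hlh : lo ≤ hi) (hhl : hi ≤ st.length)
    (hlo : ∀ p, p < lo → pvEndAt st p ≤ s)
    (hhi : ∀ p, hi ≤ p → p < st.length → s < pvEndAt st p) :
    pvBis st s lo hi ≤ st.length ∧
    (∀ p, p < pvBis st s lo hi → pvEndAt st p ≤ s) ∧
    (∀ p, pvBis st s lo hi ≤ p → p < st.length → s < pvEndAt st p) :=
  pvBisGo_spec st s mono (hi - lo) lo hi (le_refl _) hlh hhl hlo hhi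

-- characterisation of A's inner loop: 0 if no valid j, else (last valid j)+1 with last = max
theorem pvInner_cases (ivs : List (List (List Int))) (s : Int) (n : Nat) :
    (((PySem.List.pyRange 0 (n : Int) 1).foldl
        (fun place j => if s ≥ pvCell ivs j 1 then j + 1 else place) 0 = 0) ∧
      ∀ j : Int, 0 ≤ j → j < (n : Int) → ¬ pvCell ivs j 1 ≤ s) ∨
    (∃ m : Int, 0 ≤ m ∧ m < (n : Int) ∧ pvCell ivs m 1 ≤ s ∧
      (PySem.List.pyRange 0 (n : Int) 1).foldl
        (fun place j => if s ≥ pvCell ivs j 1 then j + 1 else place) 0 = m + 1 ∧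
      ∀ k : Int, m < k → k < (n : Int) → ¬ pvCell ivs k 1 ≤ s) := by
  induction n with
  | zero =>
      left
      rw [PySem.List.pyRange_one_eq_nil (by omega)]
      exact ⟨rfl, fun j h1 h2 => absurd h2 (by omega)⟩
  | succ n ih =>
      have hsplit : PySem.List.pyRange 0 ((n + 1 : Nat) : Int) 1
          = PySem.List.pyRange 0 (n : Int) 1 ++ [(n : Int)] := by
        push_cast
        exact PySem.List.pyRange_one_succ_right (by positivity)
      rw [hsplit, List.foldl_append, List.foldl_cons, List.foldl_nil]
      by_cases hv : pvCell ivs (n : Int) 1 ≤ s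
      · right
        refine ⟨(n : Int), by positivity, by push_cast; omega, hv, ?_, ?_⟩
        · rw [if_pos (ge_iff_le.mpr hv)]
        · intro k h1 h2 _
          push_cast at h2
          omega
      · rw [if_neg (by rw [ge_iff_le]; exact hv)]
        rcases ih with ⟨h0, hnone⟩ | ⟨m, hm0, hmn, hmv, hval, hmax⟩
        · left
          refine ⟨h0, fun j h1 h2 => ?_⟩
          by_cases hj : j = (n : Int)
          · rw [hj]; exact hv
          · exact hnone j h1 (by push_cast at h2; omega)
        · right
          refine ⟨m, hm0, by push_cast; omega, hmv, hval, fun k h1 h2 => ?_⟩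
          by_cases hk : k = (n : Int)
          · rw [hk]; exact hv
          · exact hmax k h1 (by push_cast at h2; omega)

-- under the invariant, B's binary-search query equals A's inner loop
theorem pvQuery_eq (ivs : List (List (List Int))) (n : Nat) (st : List (Int × Int))
    (hInv : pvInv ivs (n : Int) st) :
    (if 0 < pvBis st (pvCell ivs (n : Int) 0) 0 st.length then
        (PySem.List.pyGetD st ((pvBis st (pvCell ivs (n : Int) 0) 0 st.length : Int) - 1) (0, 0)).2 + 1
      else 0)
    = (PySem.List.pyRange 0 (n : Int) 1).foldl
        (fun place j => if pvCell ivs (n : Int) 0 ≥ pvCell ivs j 1 then j + 1 else place) 0 := by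
  obtain ⟨hpw, hmem, hcover⟩ := hInv
  have hpwE := List.pairwise_iff_getElem.mp hpw
  have hEnd : ∀ (p : Nat) (h : p < st.length), pvEndAt st p = (st[p]).1 := by
    intro p h; unfold pvEndAt; rw [List.getD_eq_getElem _ _ h]
  have mono : ∀ a b : Nat, a ≤ b → b < st.length → pvEndAt st a ≤ pvEndAt st b := by
    intro a b hab hb
    rcases Nat.lt_or_eq_of_le hab with h | h
    · rw [hEnd a (by omega), hEnd b hb]
      exact (hpwE a b (by omega) hb h).2.le
    · rw [h]
  set s := pvCell ivs (n : Int) 0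
  obtain ⟨hlolen, hbelow, habove⟩ := pvBis_spec st s mono 0 st.length (by omega)
      (le_refl _) (fun p hp => absurd hp (Nat.not_lt_zero p))
      (fun p hp hplen => absurd hplen (by omega))
  set lo := pvBis st s 0 st.length
  rcases pvInner_cases ivs s n with ⟨h0, hnone⟩ | ⟨m, hm0, hmn, hmv, hval, hmax⟩
  · have hlo0 : lo = 0 := by
      by_contra hne
      have hpos : 0 < lo := Nat.pos_of_ne_zero hne
      have h1 : lo - 1 < st.length := by omega
      have hle : pvEndAt st (lo - 1) ≤ s := hbelow (lo - 1) (by omega)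
      have hx := hmem (st[lo - 1]) (List.getElem_mem h1)
      rw [hEnd _ h1] at hle
      exact hnone (st[lo - 1]).2 hx.1 hx.2.1 (by rw [← hx.2.2]; exact hle)
    rw [h0, if_neg (by omega)]
  · obtain ⟨p, hpmem, hmp, hps⟩ := hcover m hm0 hmn
    obtain ⟨q, hq, hqe⟩ := List.getElem_of_mem hpmem
    have hqs : pvEndAt st q ≤ s := by rw [hEnd q hq, hqe]; exact hps.trans hmv
    have hqlo : q < lo := by
      by_contra hc
      exact absurd hqs (not_le.mpr (habove q (by omega) hq))
    have hpos : 0 < lo := by omega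
    have h1 : lo - 1 < st.length := by omega
    have hcast : (lo : Int) - 1 = ((lo - 1 : Nat) : Int) := by omega
    rw [hval, if_pos hpos, hcast, PySem.List.pyGetD_natCast, List.getD_eq_getElem _ _ h1]
    have hxmem := hmem (st[lo - 1]) (List.getElem_mem h1)
    have hxle : (st[lo - 1]).2 ≤ m := by
      have hle := hbelow (lo - 1) (by omega)
      rw [hEnd _ h1] at hle
      by_contra hc
      exact hmax (st[lo - 1]).2 (by omega) hxmem.2.1 (by rw [← hxmem.2.2]; exact hle)
    have hxge : m ≤ (st[lo - 1]).2 := by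
      rcases Nat.lt_or_eq_of_le (by omega : q ≤ lo - 1) with h | h
      · have := (hpwE q (lo - 1) hq h1 h).1
        rw [hqe] at this
        omega
      · subst h
        rw [hqe]
        exact hmp
    omega

theorem pvInv_step (ivs : List (List (List Int))) (n : Nat) (st : List (Int × Int))
    (hInv : pvInv ivs (n : Int) st) :
    pvInv ivs ((n : Int) + 1)
      (pvPop (pvCell ivs (n : Int) 1) st ++ [(pvCell ivs (n : Int) 1, (n : Int))]) := by
  obtain ⟨hpw, hmem, hcover⟩ := hInv
  refine ⟨?_, ?_, ?_⟩
  · rw [List.pairwise_append]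
    refine ⟨hpw.sublist (pvPop_prefix _ st).sublist, List.pairwise_singleton _ _, ?_⟩
    intro a ha b hb
    rw [List.mem_singleton.1 hb]
    have hasub := (pvPop_prefix _ st).subset ha
    exact ⟨(hmem a hasub).2.1, pvPop_lt _ st (hpw.imp (fun h => h.2)) a ha⟩
  · intro p hp
    rcases List.mem_append.1 hp with hp' | hp'
    · have := hmem p ((pvPop_prefix _ st).subset hp')
      exact ⟨this.1, by omega, this.2.2⟩
    · rw [List.mem_singleton.1 hp']
      exact ⟨by positivity, by omega, rfl⟩
  · intro j hj0 hjn
    by_cases hjn' : j = (n : Int)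
    · exact ⟨(pvCell ivs (n : Int) 1, (n : Int)),
        List.mem_append_right _ (List.mem_singleton_self _), by omega, by rw [hjn']⟩
    · have hjlt : j < (n : Int) := by omega
      obtain ⟨p, hpmem, hjp, hpe⟩ := hcover j hj0 hjlt
      by_cases hin : p ∈ pvPop (pvCell ivs (n : Int) 1) st
      · exact ⟨p, List.mem_append_left _ hin, hjp, hpe⟩
      · exact ⟨(pvCell ivs (n : Int) 1, (n : Int)),
          List.mem_append_right _ (List.mem_singleton_self _), by omega,
          le_trans (pvPop_popped _ st p hpmem hin) hpe⟩

theorem pvMain (ivs : List (List (List Int))) (n : Nat) :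
    (pvBfold ivs (n : Int)).1 = pvAfold ivs (n : Int) ∧ pvInv ivs (n : Int) (pvBfold ivs (n : Int)).2 := by
  induction n with
  | zero =>
      have h : PySem.List.pyRange 0 ((0 : Nat) : Int) 1 = [] :=
        PySem.List.pyRange_one_eq_nil (by omega)
      constructor
      · unfold pvBfold pvAfold; rw [h]; rfl
      · unfold pvBfold; rw [h]
        exact ⟨List.Pairwise.nil, by simp, fun j h1 h2 => absurd h2 (by omega)⟩
  | succ n ih =>
      have hsplit : PySem.List.pyRange 0 ((n + 1 : Nat) : Int) 1
          = PySem.List.pyRange 0 (n : Int) 1 ++ [(n : Int)] := by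
        push_cast
        exact PySem.List.pyRange_one_succ_right (by positivity)
      have hstep : pvBfold ivs ((n + 1 : Nat) : Int) =
          ((pvBfold ivs (n : Int)).1 ++
            [if 0 < pvBis (pvBfold ivs (n : Int)).2 (pvCell ivs (n : Int) 0) 0
                (pvBfold ivs (n : Int)).2.length then
              (PySem.List.pyGetD (pvBfold ivs (n : Int)).2
                ((pvBis (pvBfold ivs (n : Int)).2 (pvCell ivs (n : Int) 0) 0
                  (pvBfold ivs (n : Int)).2.length : Int) - 1) (0, 0)).2 + 1
            else 0],
           pvPop (pvCell ivs (n : Int) 1) (pvBfold ivs (n : Int)).2 ++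
            [(pvCell ivs (n : Int) 1, (n : Int))]) := by
        unfold pvBfold
        rw [hsplit, List.foldl_append, List.foldl_cons, List.foldl_nil]
      have hstepA : pvAfold ivs ((n + 1 : Nat) : Int) =
          pvAfold ivs (n : Int) ++
            [(PySem.List.pyRange 0 (n : Int) 1).foldl
              (fun place j => if pvCell ivs (n : Int) 0 ≥ pvCell ivs j 1 then j + 1 else place) 0] := by
        unfold pvAfold
        rw [hsplit, List.foldl_append, List.foldl_cons, List.foldl_nil]
      constructor
      · rw [hstep, hstepA, ih.1]
        rw [pvQuery_eq ivs n (pvBfold ivs (n : Int)).2 ih.2]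
      · rw [hstep]
        have hc : ((n + 1 : Nat) : Int) = (n : Int) + 1 := by push_cast; ring
        rw [hc]
        exact pvInv_step ivs n (pvBfold ivs (n : Int)).2 ih.2

-- ===== VERDICT (by name: the statement is the Claim_ definition above) =====
theorem opt_spec : Claim_equal_opt := by
  intro ivs _ _
  unfold Spec_opt
  rw [opt_eq_pvAfold, opt_alt_eq_pvBfold, (pvMain ivs ivs.length).1]
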